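-- pv_equiv track=rewrite | github.com/ehsanfar/ofspy_Lite | genfigs/genfigs.py | fopsGenTotal
-- ===== SOURCE A (Python) =====
-- def fopsGenTotal(des):
--     numPlayers = 2
--     if '3.' in des:
--         numPlayers = 3
--
--     costrange = [0, 600, 1200]
--     for sgl in costrange:
--         if numPlayers == 2:
--             fops_1 = ['x%d,%d,%d' % (sgl, -1, -1), 'x%d,%d,%d' % (sgl, -1, -1)]
--             fops_2 = ['x%d,%d,%d' % (-2, -1, -1), 'x%d,%d,%d' % (sgl, -1, -1)]
--             fops_3 = ['x%d,%d,%d' % (-2, -1, -1), 'x%d,%d,%d' % (-2, -1, -1)]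
--             yield (fops_1, fops_2, fops_3)
--         elif numPlayers == 3:
--             fops_1 = ['x%d,%d,%d' % (sgl, -1, -1), 'x%d,%d,%d' % (sgl, -1, -1), 'x%d,%d,%d' % (sgl, -1, -1)]
--             fops_2 = ['x%d,%d,%d' % (-2, -1, -1), 'x%d,%d,%d' % (sgl, -1, -1), 'x%d,%d,%d' % (sgl, -1, -1)]
--             fops_3 = ['x%d,%d,%d' % (-2, -1, -1), 'x%d,%d,%d' % (-2, -1, -1), 'x%d,%d,%d' % (sgl, -1, -1)]
--             fops_4 = ['x%d,%d,%d' % (-2, -1, -1), 'x%d,%d,%d' % (-2, -1, -1), 'x%d,%d,%d' % (-2, -1, -1)]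
--             yield (fops_1, fops_2, fops_3, fops_4)
-- ===== SOURCE B (Python) =====
-- def fopsGenTotal(des):
--     n = 3 if '3.' in des else 2
--     for sgl in [0, 600, 1200]:
--         yield tuple(['x%d,%d,%d' % (-2, -1, -1)] * j + ['x%d,%d,%d' % (sgl, -1, -1)] * (n - j)
--                     for j in range(n + 1))
-- ===== Notes on version B (the rewrite author's own statement) =====
-- stated objective: simpler
-- what changed: Replaces the hard-coded numPlayers==2/==3 branch of literal fops lists with one parametric construction: for each cost, the tuple of n+1 lists is generated as j dismantled-entry strings followed by n-j cost strings, for j in range(n+1).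
import Mathlib
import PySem

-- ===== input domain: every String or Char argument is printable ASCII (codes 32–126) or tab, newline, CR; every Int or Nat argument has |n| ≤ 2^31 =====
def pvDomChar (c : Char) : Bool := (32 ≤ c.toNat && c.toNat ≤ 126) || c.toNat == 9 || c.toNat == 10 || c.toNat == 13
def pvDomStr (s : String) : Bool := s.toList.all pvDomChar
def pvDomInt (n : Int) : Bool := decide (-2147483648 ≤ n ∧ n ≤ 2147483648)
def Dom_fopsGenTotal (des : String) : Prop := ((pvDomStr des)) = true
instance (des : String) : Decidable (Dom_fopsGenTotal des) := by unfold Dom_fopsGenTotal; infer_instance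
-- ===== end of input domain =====

-- B replaces A's hard-coded 2-player/3-player branch of literal lists by one parametric
-- triangular construction (j dismantled-entry strings followed by n-j cost strings); simpler.

-- ===== PORT A =====
-- 'x%d,%d,%d' % (a, -1, -1)
def pvFmtA (a : Int) : String :=
  "x" ++ PySem.Int.toStr a ++ "," ++ PySem.Int.toStr (-1) ++ "," ++ PySem.Int.toStr (-1)

def fopsGenTotal (des : String) : List (List (List String)) :=
  let numPlayers : Int := if PySem.Str.isIn "3." des then 3 else 2
  let costrange : List Int := [0, 600, 1200]
  costrange.foldl (fun acc sgl =>
    if numPlayers == 2 then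
      let fops_1 := [pvFmtA sgl, pvFmtA sgl]
      let fops_2 := [pvFmtA (-2), pvFmtA sgl]
      let fops_3 := [pvFmtA (-2), pvFmtA (-2)]
      acc ++ [[fops_1, fops_2, fops_3]]
    else if numPlayers == 3 then
      let fops_1 := [pvFmtA sgl, pvFmtA sgl, pvFmtA sgl]
      let fops_2 := [pvFmtA (-2), pvFmtA sgl, pvFmtA sgl]
      let fops_3 := [pvFmtA (-2), pvFmtA (-2), pvFmtA sgl]
      let fops_4 := [pvFmtA (-2), pvFmtA (-2), pvFmtA (-2)]
      acc ++ [[fops_1, fops_2, fops_3, fops_4]]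
    else acc) []

-- ===== PORT B =====
def pvFmtB (a : Int) : String :=
  "x" ++ PySem.Int.toStr a ++ "," ++ PySem.Int.toStr (-1) ++ "," ++ PySem.Int.toStr (-1)

def fopsGenTotal_alt (des : String) : List (List (List String)) :=
  let n : Nat := if PySem.Str.isIn "3." des then 3 else 2
  ([0, 600, 1200] : List Int).map (fun sgl =>
    (List.range (n + 1)).map (fun j =>
      List.replicate j (pvFmtB (-2)) ++ List.replicate (n - j) (pvFmtB sgl)))

-- ===== PRECONDITION & SPEC =====
def Spec_fopsGenTotal (des : String) (out : List (List (List String))) : Prop := out = fopsGenTotal_alt des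
instance (des : String) (out : List (List (List String))) : Decidable (Spec_fopsGenTotal des out) := by unfold Spec_fopsGenTotal; infer_instance

-- ===== CLAIM (what is proved, stated in full; the proofs are below) =====
def Claim_equal_fopsGenTotal : Prop := ∀ (des : String), Dom_fopsGenTotal des → Spec_fopsGenTotal des (fopsGenTotal des)

-- ===== LEMMAS AND PROOFS =====

-- ===== VERDICT (by name: the statement is the Claim_ definition above) =====
theorem fopsGenTotal_spec : Claim_equal_fopsGenTotal := by
  intro des _
  unfold Spec_fopsGenTotal fopsGenTotal fopsGenTotal_alt
  cases h : PySem.Str.isIn "3." des <;>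
    simp [List.range_succ, List.replicate, pvFmtA, pvFmtB]
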